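-- pv_equiv track=rewrite | github.com/chufeng-huang-sipaway/sip-videogen | src/sip_videogen/brands/product_description.py | _find_attributes_block
-- ===== SOURCE A (Python) =====
-- _ATTRIBUTES_HEADER = "Attributes:"
--
-- def _is_attributes_header(line: str) -> bool:
--     return line.strip().lower() == _ATTRIBUTES_HEADER.lower()
--
-- def _find_attributes_block(lines: list[str]) -> int | None:
--     """Find the start index of a trailing Attributes block, if present."""
--     for idx, line in enumerate(lines):
--         if not _is_attributes_header(line):
--             continue
--
--         tail = lines[idx + 1 :]
--         if all(not tail_line.strip() or tail_line.lstrip().startswith("-") for tail_line in tail):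
--             return idx
--     return None
-- ===== SOURCE B (Python) =====
-- _ATTRIBUTES_HEADER = "Attributes:"
--
-- def _is_attributes_header(line: str) -> bool:
--     return line.strip().lower() == _ATTRIBUTES_HEADER.lower()
--
-- def _find_attributes_block(lines: list[str]) -> int | None:
--     """Single backward pass: track whether the suffix after the current line
--     is all blank/dash lines, and remember the earliest qualifying header."""
--     result = None
--     tail_good = True
--     for idx in range(len(lines) - 1, -1, -1):
--         line = lines[idx]
--         if tail_good and _is_attributes_header(line):
--             result = idx
--         tail_good = tail_good and (not line.strip() or line.lstrip().startswith("-"))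
--     return result
-- ===== Notes on version B (the rewrite author's own statement) =====
-- stated objective: faster
-- what changed: Replaced the per-header rescan of the whole tail with a single backward pass that maintains a 'suffix is all blank/dash' flag and keeps the earliest qualifying header.
import Mathlib
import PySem

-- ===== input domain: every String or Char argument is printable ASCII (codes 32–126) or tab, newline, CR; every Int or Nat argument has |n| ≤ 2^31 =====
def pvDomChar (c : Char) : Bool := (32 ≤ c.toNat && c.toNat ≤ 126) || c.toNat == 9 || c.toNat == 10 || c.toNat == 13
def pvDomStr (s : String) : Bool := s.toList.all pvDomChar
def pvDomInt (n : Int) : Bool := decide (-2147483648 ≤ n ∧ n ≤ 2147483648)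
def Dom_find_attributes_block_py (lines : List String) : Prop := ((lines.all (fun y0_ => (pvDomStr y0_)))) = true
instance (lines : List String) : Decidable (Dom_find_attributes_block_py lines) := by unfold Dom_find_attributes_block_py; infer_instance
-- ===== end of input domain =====

-- B replaces A's per-header rescan of the tail with one backward pass (objective: faster, O(n) vs O(n^2)).

-- ===== PORT A =====
-- line.strip().lower() == "Attributes:".lower()
def pvIsHeader (line : String) : Bool :=
  PySem.Str.lower (PySem.Str.strip line) == PySem.Str.lower "Attributes:"

-- not tail_line.strip() or tail_line.lstrip().startswith("-")
def pvTailOk (line : String) : Bool :=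
  (PySem.Str.strip line == "") || PySem.Str.startswith (PySem.Str.lstrip line) "-"

-- the enumerate loop; rest = lines[idx:], tail = lines[idx+1:] taken as a slice of the full list
def pvAGo (lines : List String) (rest : List String) (idx : Nat) : Option Int :=
  match rest with
  | [] => none
  | line :: rs =>
    if pvIsHeader line then
      if (PySem.List.slice lines (some ((idx : Int) + 1)) none).all pvTailOk then
        some (idx : Int)
      else pvAGo lines rs (idx + 1)
    else pvAGo lines rs (idx + 1)

def find_attributes_block_py (lines : List String) : Option Int :=
  pvAGo lines lines 0

-- ===== PORT B =====
-- the backward index loop of Source B, as structural recursion computing each suffix's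
-- (result, tail_good) from the next suffix's pair
def pvBGo (idx : Nat) : List String → Option Int × Bool
  | [] => (none, true)
  | line :: ls =>
    let p := pvBGo (idx + 1) ls
    ((if p.2 && pvIsHeader line then some (idx : Int) else p.1),
     p.2 && pvTailOk line)

def find_attributes_block_py_alt (lines : List String) : Option Int :=
  (pvBGo 0 lines).1

-- ===== PRECONDITION & SPEC =====
def Spec_find_attributes_block_py (lines : List String) (out : Option Int) : Prop := out = find_attributes_block_py_alt lines
instance (lines : List String) (out : Option Int) : Decidable (Spec_find_attributes_block_py lines out) := by unfold Spec_find_attributes_block_py; infer_instance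

-- ===== CLAIM (what is proved, stated in full; the proofs are below) =====
def Claim_equal_find_attributes_block_py : Prop := ∀ (lines : List String), Dom_find_attributes_block_py lines → Spec_find_attributes_block_py lines (find_attributes_block_py lines)

-- ===== LEMMAS AND PROOFS =====

-- the flag component of B's pair is exactly "every line of the suffix is blank-or-dash"
theorem pvBGo_snd (idx : Nat) (ls : List String) :
    (pvBGo idx ls).2 = ls.all pvTailOk := by
  induction ls generalizing idx with
  | nil => simp [pvBGo]
  | cons l ls ih => simp [pvBGo, ih, Bool.and_comm]

theorem pvAGo_eq_pvBGo (lines rest : List String) (idx : Nat)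
    (h : rest = lines.drop idx) :
    pvAGo lines rest idx = (pvBGo idx rest).1 := by
  induction rest generalizing idx with
  | nil => simp [pvAGo, pvBGo]
  | cons l rs ih =>
    have hrs : rs = lines.drop (idx + 1) := by
      have : List.drop 1 (lines.drop idx) = lines.drop (idx + 1) := by
        rw [List.drop_drop]
      rw [← this, ← h]; rfl
    have hslice : PySem.List.slice lines (some ((idx : Int) + 1)) none = rs := by
      have : ((idx : Int) + 1) = ((idx + 1 : Nat) : Int) := by push_cast; ring
      rw [this, PySem.List.slice_from_natCast, ← hrs]
    simp only [pvAGo, pvBGo, hslice, pvBGo_snd]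
    by_cases hh : pvIsHeader l <;> by_cases ha : rs.all pvTailOk <;>
      simp [hh, ha, ih _ hrs]

-- ===== VERDICT (by name: the statement is the Claim_ definition above) =====
theorem find_attributes_block_py_spec : Claim_equal_find_attributes_block_py := by
  intro lines _
  unfold Spec_find_attributes_block_py find_attributes_block_py find_attributes_block_py_alt
  exact pvAGo_eq_pvBGo lines lines 0 rfl
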